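-- pv_equiv track=rewrite | github.com/hana904/Kriptografi | Prak3 per4/Latihan2/Jenis permutasi di inputdari key.py | permutasi_keliling
-- ===== SOURCE A (Python) =====
-- import itertools
--
-- def permutasi_keliling(arr):
--     if len(arr) <= 1:
--         return [arr]
--     pertama = arr[0]
--     sisa = arr[1:]
--     hasil = []
--     for perm in itertools.permutations(sisa):
--         hasil.append([pertama] + list(perm))
--     return hasil
-- ===== SOURCE B (Python) =====
-- def permutasi_keliling(arr):
--     # Iterative breadth-first expansion: keep (partial_perm, remaining) states
--     # and expand each state by every remaining element in index order.
--     if len(arr) <= 1: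
--         return [arr]
--     states = [([arr[0]], arr[1:])]
--     for _ in range(len(arr) - 1):
--         states = [(p + [x], rest[:i] + rest[i + 1:])
--                   for (p, rest) in states
--                   for (i, x) in enumerate(rest)]
--     return [p for (p, _) in states]
-- ===== Notes on version B (the rewrite author's own statement) =====
-- stated objective: alternative
-- what changed: Replaces the itertools.permutations call with an iterative breadth-first state expansion: a worklist of (partial permutation, remaining elements) pairs is expanded level by level, each state by every remaining element in index order, which reproduces the lexicographic-by-index enumeration exactly.
import Mathlib
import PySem

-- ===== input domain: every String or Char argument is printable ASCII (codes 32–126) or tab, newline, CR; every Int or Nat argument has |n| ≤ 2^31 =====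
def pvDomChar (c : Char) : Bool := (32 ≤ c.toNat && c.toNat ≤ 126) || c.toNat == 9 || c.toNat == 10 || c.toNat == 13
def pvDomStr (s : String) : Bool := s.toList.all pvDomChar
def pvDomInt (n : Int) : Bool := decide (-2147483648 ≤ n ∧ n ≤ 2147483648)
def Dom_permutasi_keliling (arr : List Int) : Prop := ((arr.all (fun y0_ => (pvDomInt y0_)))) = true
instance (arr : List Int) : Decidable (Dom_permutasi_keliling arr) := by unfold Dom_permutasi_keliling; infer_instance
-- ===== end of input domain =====

-- B replaces the itertools.permutations call by an iterative breadth-first expansion of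
-- (partial permutation, remaining) states, preserving the exact enumeration order (objective: alternative).


-- ===== PORT A =====
-- itertools.permutations(sisa) ported as the standard selection recursion producing
-- exactly its lexicographic-by-index order: pick each element in index order, recurse on the rest.
def pvSelections : List Int → List (Int × List Int)
  | [] => []
  | x :: xs => (x, xs) :: (pvSelections xs).map (fun yz => (yz.1, x :: yz.2))

def pvPermsAux : Nat → List Int → List (List Int)
  | 0, _ => [[]]
  | n + 1, xs => (pvSelections xs).flatMap (fun yz => (pvPermsAux n yz.2).map (fun t => yz.1 :: t))

def permutasi_keliling (arr : List Int) : List (List Int) :=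
  if arr.length ≤ 1 then [arr]
  else
    match arr with
    | [] => [arr]  -- unreachable under the guard
    | pertama :: sisa => (pvPermsAux sisa.length sisa).map (fun perm => pertama :: perm)

-- ===== PORT B =====
-- one level of breadth-first expansion: each (p, rest) state by every remaining element in index order
def pvStep (states : List (List Int × List Int)) : List (List Int × List Int) :=
  states.flatMap (fun pr =>
    (PySem.List.enumerate pr.2 0).map (fun ix =>
      (pr.1 ++ [ix.2],
       PySem.List.slice pr.2 none (some ix.1) ++ PySem.List.slice pr.2 (some (ix.1 + 1)) none)))

def permutasi_keliling_alt (arr : List Int) : List (List Int) :=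
  if arr.length ≤ 1 then [arr]
  else
    match arr with
    | [] => [arr]  -- unreachable under the guard
    | x :: rest =>
      ((List.range (arr.length - 1)).foldl (fun st _ => pvStep st) [([x], rest)]).map
        (fun pr => pr.1)

-- ===== PRECONDITION & SPEC =====
def Spec_permutasi_keliling (arr : List Int) (out : List (List Int)) : Prop := out = permutasi_keliling_alt arr
instance (arr : List Int) (out : List (List Int)) : Decidable (Spec_permutasi_keliling arr out) := by unfold Spec_permutasi_keliling; infer_instance

-- ===== CLAIM (what is proved, stated in full; the proofs are below) =====
def Claim_equal_permutasi_keliling : Prop := ∀ (arr : List Int), Dom_permutasi_keliling arr → Spec_permutasi_keliling arr (permutasi_keliling arr)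

-- ===== LEMMAS AND PROOFS =====

-- each selection's rest is one element shorter
lemma pvSelections_len (xs : List Int) :
    ∀ yz ∈ pvSelections xs, yz.2.length + 1 = xs.length := by
  induction xs with
  | nil => simp [pvSelections]
  | cons x xs ih =>
    intro yz hyz
    simp only [pvSelections, List.mem_cons, List.mem_map] at hyz
    rcases hyz with h | ⟨zz, hz, rfl⟩
    · subst h; simp
    · have := ih zz hz; simp; omega

-- enumerate + slicing over a suffix yields exactly the selection list
lemma pvEnum_slice (p : List Int) :
    ∀ (xs pre : List Int),
      (PySem.List.enumerate xs (pre.length : Int)).map (fun ix =>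
        (p ++ [ix.2],
         PySem.List.slice (pre ++ xs) none (some ix.1) ++
         PySem.List.slice (pre ++ xs) (some (ix.1 + 1)) none))
      = (pvSelections xs).map (fun yz => (p ++ [yz.1], pre ++ yz.2)) := by
  intro xs
  induction xs with
  | nil => intro pre; simp [PySem.List.enumerate_nil, pvSelections]
  | cons x xs ih =>
    intro pre
    have h1 : ((pre.length : Int) + 1) = ((pre.length + 1 : Nat) : Int) := by push_cast; ring
    rw [PySem.List.enumerate_cons]
    simp only [List.map_cons, pvSelections, List.map_map]
    congr 1
    · have ht : (pre ++ x :: xs).take pre.length = pre := List.take_left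
      have hd : (pre ++ x :: xs).drop (pre.length + 1) = xs := by
        have he : pre ++ x :: xs = (pre ++ [x]) ++ xs := by simp
        have hl : (pre ++ [x]).length = pre.length + 1 := by simp
        rw [he, ← hl, List.drop_left]
      rw [PySem.List.slice_to_natCast, h1, PySem.List.slice_from_natCast, ht, hd]
    · have hlen : ((pre.length : Int) + 1) = (((pre ++ [x]).length : Nat) : Int) := by
        rw [h1]; simp
      have hfull : pre ++ x :: xs = (pre ++ [x]) ++ xs := by simp
      rw [hlen, hfull, ih (pre ++ [x])]
      simp [Function.comp]

lemma pvStep_eq (states : List (List Int × List Int)) :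
    pvStep states
      = states.flatMap (fun pr =>
          (pvSelections pr.2).map (fun yz => (pr.1 ++ [yz.1], yz.2))) := by
  unfold pvStep
  apply List.flatMap_congr
  intro pr _
  have := pvEnum_slice pr.1 pr.2 []
  simpa using this

-- iterating pvStep k times on states whose rests all have length k flattens to pvPermsAux
lemma pvIterate_step (k : Nat) :
    ∀ (states : List (List Int × List Int)),
      (∀ pr ∈ states, pr.2.length = k) →
      (pvStep^[k] states).map (fun pr => pr.1)
        = states.flatMap (fun pr => (pvPermsAux k pr.2).map (fun t => pr.1 ++ t)) := by
  induction k with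
  | zero =>
    intro states _
    simp only [Function.iterate_zero, id_eq, pvPermsAux]
    induction states with
    | nil => simp
    | cons s ss ihs => simp_all
  | succ k ih =>
    intro states h
    rw [Function.iterate_succ_apply]
    rw [ih (pvStep states) ?hlen]
    · rw [pvStep_eq, List.flatMap_assoc]  -- name may differ
      apply List.flatMap_congr
      intro pr _
      simp only [List.flatMap_map, pvPermsAux, List.map_flatMap, List.map_map]
      apply List.flatMap_congr
      intro yz _
      simp [Function.comp]
    · intro pr hpr
      rw [pvStep_eq] at hpr
      simp only [List.mem_flatMap, List.mem_map] at hpr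
      obtain ⟨q, hq, yz, hyz, rfl⟩ := hpr
      have := pvSelections_len q.2 yz hyz
      have := h q hq
      simp; omega

lemma pvFoldl_range (n : Nat) (s : List (List Int × List Int)) :
    (List.range n).foldl (fun st _ => pvStep st) s = pvStep^[n] s := by
  induction n generalizing s with
  | zero => simp
  | succ n ihn =>
    rw [List.range_succ, List.foldl_append]
    simp [ihn, Function.iterate_succ_apply']

-- ===== VERDICT (by name: the statement is the Claim_ definition above) =====
theorem permutasi_keliling_spec : Claim_equal_permutasi_keliling := by
  intro arr _
  unfold Spec_permutasi_keliling
  cases arr with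
  | nil => rfl
  | cons x rest =>
    by_cases hlen : (x :: rest).length ≤ 1
    · cases rest with
      | nil => rfl
      | cons y ys => simp at hlen
    · have hr : (x :: rest).length - 1 = rest.length := by simp
      simp only [permutasi_keliling, permutasi_keliling_alt, hlen, if_false, hr]
      rw [pvFoldl_range,
          pvIterate_step rest.length [([x], rest)] (by simp)]
      simp
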